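-- pv_equiv track=rewrite | github.com/IndranilUvA/LeetCode-Solutions | 1402-reducing-dishes/1402-reducing-dishes.py | maxSatisfaction
-- ===== SOURCE A (Python) =====
-- from typing import List
--
-- def maxSatisfaction(satisfaction: List[int]) -> int:
--
--     # nice explanation here: https://leetcode.com/problems/reducing-dishes/discuss/563384/JavaC%2B%2BPython-Easy-and-Concise
--     # example: [-1,-8,0,5,-9]
--     # After sorting: [-9,-8, -1, 0, 5]
--     # we run from the right and keep traversing untill the total dish becomes negative
--     # ans = ans + total makes sure that the 5 at the right is multiplied by 3 as that's the time for satisfaction = 5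
--     # sorting and keeping the max at the right and adding it as much as we can is the idea
--     # when the total becomes negative it would start reducing the ans, so we stop there
--
--     satisfaction.sort()
--     ans = 0
--     total = 0
--
--     while satisfaction and satisfaction[-1] + total > 0:
--         dish = satisfaction.pop()
--         total = total + dish
--         ans = ans + total
--
--     return ans
-- ===== SOURCE B (Python) =====
-- from typing import List
--
-- def maxSatisfaction(satisfaction: List[int]) -> int:
--     # DP over the number of top dishes taken: for each count k (scanning dishes
--     # in descending order) the candidate total is the sum of the k largest
--     # suffix sums; return the best candidate (k = 0 gives 0).
--     best = 0
--     total = 0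
--     cum = 0
--     for d in sorted(satisfaction, reverse=True):
--         total += d
--         cum += total
--         best = max(best, cum)
--     return best
-- ===== Notes on version B (the rewrite author's own statement) =====
-- stated objective: alternative
-- what changed: Replaces the destructive greedy pop-until-nonpositive loop with a non-mutating DP that scans the dishes in descending order once, evaluates the time-weighted total for every candidate count k, and returns the maximum (return value proved equal; A additionally mutates its argument, B does not).
import Mathlib
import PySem

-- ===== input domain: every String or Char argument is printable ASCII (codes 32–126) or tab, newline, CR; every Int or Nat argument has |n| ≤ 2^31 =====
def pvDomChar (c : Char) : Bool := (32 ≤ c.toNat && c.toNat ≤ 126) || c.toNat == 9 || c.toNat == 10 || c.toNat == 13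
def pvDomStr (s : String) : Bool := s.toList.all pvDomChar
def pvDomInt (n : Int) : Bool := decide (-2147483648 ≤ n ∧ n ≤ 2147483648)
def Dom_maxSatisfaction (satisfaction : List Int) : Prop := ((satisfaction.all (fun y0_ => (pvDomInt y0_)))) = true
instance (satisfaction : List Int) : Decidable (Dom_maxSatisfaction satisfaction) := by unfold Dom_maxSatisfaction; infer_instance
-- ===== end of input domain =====

-- B replaces A's destructive greedy pop loop with a one-pass descending-order DP over all
-- candidate counts; equivalence is about the RETURN value only (A sorts and pops its argument
-- in place, B does not mutate it).

-- ===== PORT A =====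
-- while satisfaction and satisfaction[-1] + total > 0: dish = satisfaction.pop(); …
def loopA (l : List Int) (total ans : Int) : Int :=
  match h : l.getLast? with
  | none => ans
  | some d =>
      if d + total > 0 then loopA l.dropLast (total + d) (ans + (total + d)) else ans
termination_by l.length
decreasing_by
  have hne : l ≠ [] := by intro e; subst e; simp at h
  simp [List.length_dropLast]
  exact List.length_pos_iff.mpr hne

def maxSatisfaction (satisfaction : List Int) : Int :=
  loopA (PySem.List.sorted satisfaction (fun x => x) false) 0 0

-- ===== PORT B =====
-- for d in sorted(satisfaction, reverse=True): total += d; cum += total; best = max(best, cum)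
def loopB : List Int → Int → Int → Int → Int
  | [], _, _, best => best
  | d :: rest, total, cum, best =>
      loopB rest (total + d) (cum + (total + d)) (max best (cum + (total + d)))

def maxSatisfaction_alt (satisfaction : List Int) : Int :=
  loopB (PySem.List.sorted satisfaction (fun x => x) true) 0 0 0

-- ===== PRECONDITION & SPEC =====
def Spec_maxSatisfaction (satisfaction : List Int) (out : Int) : Prop := out = maxSatisfaction_alt satisfaction
instance (satisfaction : List Int) (out : Int) : Decidable (Spec_maxSatisfaction satisfaction out) := by unfold Spec_maxSatisfaction; infer_instance

-- ===== CLAIM (what is proved, stated in full; the proofs are below) =====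
def Claim_equal_maxSatisfaction : Prop := ∀ (satisfaction : List Int), Dom_maxSatisfaction satisfaction → Spec_maxSatisfaction satisfaction (maxSatisfaction satisfaction)

-- ===== LEMMAS AND PROOFS =====

-- A's pop-from-the-end loop, rewritten as head recursion on the reversed list.
def loopArev : List Int → Int → Int → Int
  | [], _, ans => ans
  | d :: rest, total, ans =>
      if d + total > 0 then loopArev rest (total + d) (ans + (total + d)) else ans

theorem loopA_eq_loopArev_reverse (r : List Int) :
    ∀ t a : Int, loopA r.reverse t a = loopArev r t a := by
  induction r with
  | nil => intro t a; rw [loopA.eq_def]; simp [loopArev]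
  | cons d rest ih =>
      intro t a
      rw [List.reverse_cons, loopA.eq_def]
      split
      next h => simp at h
      next d1 h =>
        rw [List.getLast?_concat] at h
        injection h with hd
        subst hd
        rw [List.dropLast_concat]
        simp only [loopArev]
        split_ifs with hc
        · exact ih _ _
        · rfl

theorem loopA_eq (l : List Int) (t a : Int) : loopA l t a = loopArev l.reverse t a := by
  have := loopA_eq_loopArev_reverse l.reverse t a
  rwa [List.reverse_reverse] at this

-- Once the running total is nonpositive and every remaining dish is nonpositive,
-- no later candidate can beat the current best.
theorem loopB_stop (r : List Int) :
    ∀ t c b : Int, (∀ x ∈ r, x ≤ 0) → t ≤ 0 → c ≤ b → loopB r t c b = b := by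
  induction r with
  | nil => intro t c b _ _ _; rfl
  | cons d rest ih =>
      intro t c b hall ht hcb
      have hd : d ≤ 0 := hall d (by simp)
      have h1 : t + d ≤ 0 := by omega
      have h2 : c + (t + d) ≤ b := by omega
      have hmax : max b (c + (t + d)) = b := by omega
      simp only [loopB, hmax]
      exact ih _ _ _ (fun x hx => hall x (by simp [hx])) h1 h2

-- Main invariant: on a nonincreasing list with nonnegative running total, the greedy
-- loop (ans = c) computes the same value as the max-over-all-counts loop started at best = c.
theorem loopArev_eq_loopB (r : List Int) :
    r.Pairwise (fun a b => b ≤ a) → ∀ t c : Int, 0 ≤ t → loopArev r t c = loopB r t c c := by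
  induction r with
  | nil => intro _ t c _; rfl
  | cons d rest ih =>
      intro hp t c ht
      rcases List.pairwise_cons.mp hp with ⟨hhead, hrest⟩
      simp only [loopArev, loopB]
      split_ifs with h
      · have hmax : max c (c + (t + d)) = c + (t + d) := by omega
        rw [hmax]
        exact ih hrest (t + d) (c + (t + d)) (by omega)
      · have hd : d ≤ 0 := by omega
        have hmax : max c (c + (t + d)) = c := by omega
        rw [hmax]
        exact (loopB_stop rest (t + d) (c + (t + d)) c
          (fun x hx => le_trans (hhead x hx) hd) (by omega) (by omega)).symm

-- Descending stable sort of integers is the reverse of the ascending one.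
theorem sorted_rev_eq_reverse (s : List Int) :
    PySem.List.sorted s (fun x => x) true = (PySem.List.sorted s (fun x => x) false).reverse := by
  have hperm : (PySem.List.sorted s (fun x => x) true).Perm
      ((PySem.List.sorted s (fun x => x) false).reverse) :=
    (PySem.List.sorted_perm s (fun x => x) true).trans
      ((PySem.List.sorted_perm s (fun x => x) false).symm.trans
        (List.reverse_perm _).symm)
  exact List.Perm.eq_of_pairwise (le := fun a b : Int => b ≤ a)
    (fun a b _ _ h1 h2 => le_antisymm h2 h1)
    (PySem.List.sorted_pairwise_rev s (fun x => x))
    ((List.pairwise_reverse).mpr (PySem.List.sorted_pairwise s (fun x => x)))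
    hperm

-- ===== VERDICT (by name: the statement is the Claim_ definition above) =====
theorem maxSatisfaction_spec : Claim_equal_maxSatisfaction := by
  intro s _
  unfold Spec_maxSatisfaction maxSatisfaction maxSatisfaction_alt
  rw [loopA_eq, sorted_rev_eq_reverse]
  exact loopArev_eq_loopB _
    ((List.pairwise_reverse).mpr (PySem.List.sorted_pairwise s (fun x => x))) 0 0 le_rfl
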